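-- pv_equiv track=rewrite | github.com/glsalierno/quick-hazard-assessment-app | utils/sds_pdf_utils.py | extract_tables_from_text
-- ===== SOURCE A (Python) =====
-- def extract_tables_from_text(text: str) -> list[list[list[str]]]:
--     """
--     Heuristic extraction of table-like structures from plain text.
--     Detects rows by pipe (|) or tab separators; groups consecutive rows with
--     the same cell count into tables. Returns list of tables; each table is
--     list of rows; each row is list of cell strings.
--     """
--     if not text or not text.strip():
--         return []
--     tables: list[list[list[str]]] = []
--     current: list[list[str]] = []
--     prev_len = -1
--     for line in text.replace("\r", "\n").split("\n"):
--         line = line.strip()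
--         if not line:
--             if current:
--                 tables.append(current)
--                 current = []
--             prev_len = -1
--             continue
--         cells: list[str]
--         if "|" in line:
--             cells = [c.strip() for c in line.split("|")]
--         elif "\t" in line:
--             cells = [c.strip() for c in line.split("\t")]
--         else:
--             if current:
--                 tables.append(current)
--                 current = []
--             prev_len = -1
--             continue
--         if len(cells) < 2:
--             continue
--         if prev_len != -1 and len(cells) != prev_len:
--             if current:
--                 tables.append(current)
--                 current = []
--         current.append(cells)
--         prev_len = len(cells)
--     if current:
--         tables.append(current)
--     return tables
-- ===== SOURCE B (Python) =====
-- def extract_tables_from_text(text: str) -> list[list[list[str]]]: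
--     """Two-pass variant: tokenise lines into cell rows / break markers, then
--     fold the token stream into tables keyed on the current table's last row."""
--     if not text or not text.strip():
--         return []
--     tokens: list = []
--     for line in text.replace("\r", "\n").split("\n"):
--         line = line.strip()
--         if "|" in line or "\t" in line:
--             sep = "|" if "|" in line else "\t"
--             tokens.append([c.strip() for c in line.split(sep)])
--         else:
--             tokens.append(None)
--     tables: list[list[list[str]]] = []
--     current: list[list[str]] = []
--     for tok in tokens:
--         if tok is None:
--             if current:
--                 tables.append(current)
--             current = []
--         elif current and len(current[-1]) != len(tok):
--             tables.append(current)
--             current = [tok]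
--         else:
--             current.append(tok)
--     if current:
--         tables.append(current)
--     return tables
-- ===== Notes on version B (the rewrite author's own statement) =====
-- stated objective: alternative
-- what changed: B splits A's single interleaved loop into two passes: a tokenisation pass mapping each line to a parsed cell row or a break marker (None), then a fold that groups tokens into tables keyed on the length of the current table's last row, eliminating A's prev_len/-1 sentinel and its unreachable len(cells)<2 branch.
import Mathlib
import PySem

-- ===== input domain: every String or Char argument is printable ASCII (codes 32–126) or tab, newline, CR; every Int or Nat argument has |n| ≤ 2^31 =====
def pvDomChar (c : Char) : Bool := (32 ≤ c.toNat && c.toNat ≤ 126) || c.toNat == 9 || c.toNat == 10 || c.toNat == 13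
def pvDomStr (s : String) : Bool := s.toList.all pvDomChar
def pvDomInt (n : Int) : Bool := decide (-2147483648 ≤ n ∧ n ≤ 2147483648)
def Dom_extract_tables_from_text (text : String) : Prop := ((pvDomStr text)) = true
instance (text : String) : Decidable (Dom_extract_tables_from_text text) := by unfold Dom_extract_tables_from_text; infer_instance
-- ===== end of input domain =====

-- B separates tokenisation from grouping: a first pass maps each line to a parsed row or a
-- break marker, a second fold groups tokens into tables keyed on the current table's last row
-- (no prev_len/-1 sentinel); same return value, proved equal on all of Dom.

-- ===== PORT A =====
-- [c.strip() for c in line.split(sep)]  (string work on the List Char side, as PySem prescribes)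
def pvCellsA (line sep : List Char) : List String :=
  (PySem.Chars.splitOn line sep).map (fun c => String.ofList (PySem.Chars.strip c))

-- body of A's loop after 'cells' is bound (the 'len(cells) < 2: continue' and the grouping)
def pvRowA (st : List (List (List String)) × List (List String) × Int) (cells : List String) :
    List (List (List String)) × List (List String) × Int :=
  if cells.length < 2 then st
  else
    let p :=
      if st.2.2 ≠ -1 ∧ (cells.length : Int) ≠ st.2.2 then
        ((if st.2.1 ≠ [] then st.1 ++ [st.2.1] else st.1), ([] : List (List String)))
      else (st.1, st.2.1)
    (p.1, p.2 ++ [cells], (cells.length : Int))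

-- one iteration of A's 'for line in …' loop; state = (tables, current, prev_len)
def pvStepA (st : List (List (List String)) × List (List String) × Int) (line0 : List Char) :
    List (List (List String)) × List (List String) × Int :=
  let line := PySem.Chars.strip line0
  if line = [] then
    ((if st.2.1 ≠ [] then st.1 ++ [st.2.1] else st.1), [], -1)
  else if PySem.Chars.isIn ['|'] line then
    pvRowA st (pvCellsA line ['|'])
  else if PySem.Chars.isIn ['\t'] line then
    pvRowA st (pvCellsA line ['\t'])
  else
    ((if st.2.1 ≠ [] then st.1 ++ [st.2.1] else st.1), [], -1)

-- 'if current: tables.append(current); return tables' after A's loop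
def pvFinishA (fin : List (List (List String)) × List (List String) × Int) : List (List (List String)) :=
  if fin.2.1 ≠ [] then fin.1 ++ [fin.2.1] else fin.1

def extract_tables_from_text (text : String) : List (List (List String)) :=
  if text.toList = [] ∨ PySem.Chars.strip text.toList = [] then []
  else
    pvFinishA ((PySem.Chars.splitOn (PySem.Chars.replace text.toList ['\r'] ['\n']) ['\n']).foldl pvStepA ([], [], -1))

-- ===== PORT B =====
-- first pass: a line becomes 'some cells' (separator present) or 'none' (break marker)
def pvTokenB (line0 : List Char) : Option (List String) :=
  let line := PySem.Chars.strip line0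
  if PySem.Chars.isIn ['|'] line || PySem.Chars.isIn ['\t'] line then
    let sep := if PySem.Chars.isIn ['|'] line then ['|'] else ['\t']
    some ((PySem.Chars.splitOn line sep).map (fun c => String.ofList (PySem.Chars.strip c)))
  else none

-- second pass: fold tokens into tables; state = (tables, current); 'current[-1]' via pyGetD
def pvStepB (st : List (List (List String)) × List (List String)) (tok : Option (List String)) :
    List (List (List String)) × List (List String) :=
  match tok with
  | none => ((if st.2 ≠ [] then st.1 ++ [st.2] else st.1), [])
  | some cells =>
    if st.2 ≠ [] ∧ (PySem.List.pyGetD st.2 (-1) []).length ≠ cells.length then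
      (st.1 ++ [st.2], [cells])
    else
      (st.1, st.2 ++ [cells])

-- flush the remaining current table
def pvFinishB (fin : List (List (List String)) × List (List String)) : List (List (List String)) :=
  if fin.2 ≠ [] then fin.1 ++ [fin.2] else fin.1

def extract_tables_from_text_alt (text : String) : List (List (List String)) :=
  if text.toList = [] ∨ PySem.Chars.strip text.toList = [] then []
  else
    pvFinishB (((PySem.Chars.splitOn (PySem.Chars.replace text.toList ['\r'] ['\n']) ['\n']).map pvTokenB).foldl pvStepB ([], []))

-- ===== PRECONDITION & SPEC =====
def Spec_extract_tables_from_text (text : String) (out : List (List (List String))) : Prop := out = extract_tables_from_text_alt text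
instance (text : String) (out : List (List (List String))) : Decidable (Spec_extract_tables_from_text text out) := by unfold Spec_extract_tables_from_text; infer_instance

-- ===== CLAIM (what is proved, stated in full; the proofs are below) =====
def Claim_equal_extract_tables_from_text : Prop := ∀ (text : String), Dom_extract_tables_from_text text → Spec_extract_tables_from_text text (extract_tables_from_text text)

-- ===== LEMMAS AND PROOFS =====

-- A's prev_len is -1 exactly when current is empty, and otherwise the length of current's last row
def pvInv (st : List (List (List String)) × List (List String) × Int) : Prop :=
  match st.2.1.getLast? with
  | none => st.2.2 = -1
  | some last => st.2.2 = (last.length : Int)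

-- splitOn.go produces at least one piece more than acc
theorem pv_go_len_ge (sep : List Char) :
    ∀ (fuel : Nat) (l cur : List Char) (acc : List (List Char)),
      acc.length + 1 ≤ (PySem.Chars.splitOn.go sep fuel l cur acc).length := by
  intro fuel
  induction fuel with
  | zero => intro l cur acc; simp [PySem.Chars.splitOn.go]
  | succ f ih =>
    intro l cur acc
    cases l with
    | nil => simp [PySem.Chars.splitOn.go]
    | cons c rest =>
      simp only [PySem.Chars.splitOn.go]
      split
      · have := ih (List.drop sep.length (c :: rest)) [] (cur.reverse :: acc)
        simp at this; omega
      · exact ih rest (c :: cur) acc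

-- with the separator still ahead (and enough fuel), go produces at least two pieces more than acc
theorem pv_go_len_two (sep : List Char) (hsep : sep ≠ []) :
    ∀ (fuel : Nat) (l cur : List Char) (acc : List (List Char)),
      l.length < fuel → (∃ j, sep <+: l.drop j) →
      acc.length + 2 ≤ (PySem.Chars.splitOn.go sep fuel l cur acc).length := by
  intro fuel
  induction fuel with
  | zero => intro l cur acc h; omega
  | succ f ih =>
    intro l cur acc hlen hj
    cases l with
    | nil =>
      obtain ⟨j, hj⟩ := hj
      simp at hj
      exact absurd hj hsep
    | cons c rest =>
      simp only [PySem.Chars.splitOn.go]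
      split
      · have := pv_go_len_ge sep f (List.drop sep.length (c :: rest)) [] (cur.reverse :: acc)
        simp at this; omega
      · rename_i hnp
        obtain ⟨j, hj⟩ := hj
        cases j with
        | zero =>
          simp at hj
          exact absurd (List.isPrefixOf_iff_prefix.mpr hj) (by simpa using hnp)
        | succ j' =>
          have : ∃ j, sep <+: rest.drop j := ⟨j', by simpa using hj⟩
          have := ih rest (c :: cur) acc (by simp at hlen ⊢; omega) this
          omega

-- a line that contains the separator splits into at least two pieces
theorem pv_splitOn_len_two (s sep : List Char) (hsep : sep ≠ [])
    (h : PySem.Chars.isIn sep s = true) : 2 ≤ (PySem.Chars.splitOn s sep).length := by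
  have hj := (PySem.Chars.exists_prefix_drop_iff_isIn (sub := sep) (s := s)).mpr h
  have := pv_go_len_two sep hsep (s.length + 1) s [] [] (by omega) hj
  simpa [PySem.Chars.splitOn] using this

-- B's grouping step on a parsed row agrees with A's and preserves the invariant
theorem pv_row_sim (st : List (List (List String)) × List (List String) × Int)
    (hinv : pvInv st) (cells : List String) (hlen : 2 ≤ cells.length) :
    pvStepB (st.1, st.2.1) (some cells) = ((pvRowA st cells).1, (pvRowA st cells).2.1) ∧
    pvInv (pvRowA st cells) := by
  obtain ⟨tables, current, prev⟩ := st
  simp only [pvRowA]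
  rw [if_neg (by omega)]
  rcases hc : current.getLast? with _ | last
  · have hcur : current = [] := by simpa using hc
    subst hcur
    have hprev : prev = -1 := by simpa [pvInv] using hinv
    subst hprev
    simp [pvStepB, pvInv]
  · obtain ⟨pre, hpre⟩ := List.getLast?_eq_some_iff.mp hc
    have hprev : prev = ((last.length : Nat) : Int) := by simpa [pvInv, hc] using hinv
    subst hprev hpre
    have hget : PySem.List.pyGetD (pre ++ [last]) (-1) ([] : List String) = last :=
      PySem.List.pyGetD_neg_one_append_singleton pre last []
    by_cases hne : last.length = cells.length
    · rw [if_neg (by simp [hne])]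
      simp only [pvStepB]
      rw [if_neg (by simp [hget, hne])]
      simp [pvInv]
    · rw [if_pos ⟨by omega, fun h => hne (by exact_mod_cast h.symm)⟩]
      simp only [pvStepB]
      rw [if_pos ⟨by simp, by rw [hget]; exact hne⟩]
      simp [pvInv]

-- one step of A simulates one step of B and preserves the invariant
theorem pv_step_sim (st : List (List (List String)) × List (List String) × Int)
    (hinv : pvInv st) (line0 : List Char) :
    pvStepB (st.1, st.2.1) (pvTokenB line0) = ((pvStepA st line0).1, (pvStepA st line0).2.1) ∧
    pvInv (pvStepA st line0) := by
  set line := PySem.Chars.strip line0 with hline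
  by_cases hp : PySem.Chars.isIn ['|'] line = true
  · have hl : line ≠ [] := by intro h; rw [h] at hp; exact absurd hp (by decide)
    have hA : pvStepA st line0 = pvRowA st (pvCellsA line ['|']) := by
      simp only [pvStepA, ← hline]; rw [if_neg hl, if_pos hp]
    have hB : pvTokenB line0 = some (pvCellsA line ['|']) := by
      simp [pvTokenB, pvCellsA, ← hline, hp]
    have hlen : 2 ≤ (pvCellsA line ['|']).length := by
      simpa [pvCellsA] using pv_splitOn_len_two line ['|'] (by simp) hp
    rw [hA, hB]
    exact pv_row_sim st hinv _ hlen
  · by_cases ht : PySem.Chars.isIn ['\t'] line = true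
    · have hl : line ≠ [] := by intro h; rw [h] at ht; exact absurd ht (by decide)
      have hA : pvStepA st line0 = pvRowA st (pvCellsA line ['\t']) := by
        simp only [pvStepA, ← hline]; rw [if_neg hl, if_neg hp, if_pos ht]
      have hB : pvTokenB line0 = some (pvCellsA line ['\t']) := by
        simp [pvTokenB, pvCellsA, ← hline, hp, ht]
      have hlen : 2 ≤ (pvCellsA line ['\t']).length := by
        simpa [pvCellsA] using pv_splitOn_len_two line ['\t'] (by simp) ht
      rw [hA, hB]
      exact pv_row_sim st hinv _ hlen
    · -- no separator (this also covers the blank-line branch): both sides flush and reset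
      have hB : pvTokenB line0 = none := by simp [pvTokenB, ← hline, hp, ht]
      have hA : pvStepA st line0 = ((if st.2.1 ≠ [] then st.1 ++ [st.2.1] else st.1), [], -1) := by
        by_cases hl : line = []
        · simp only [pvStepA, ← hline]; rw [if_pos hl]
        · simp only [pvStepA, ← hline]; rw [if_neg hl, if_neg hp, if_neg ht]
      rw [hA, hB]
      refine ⟨?_, by simp [pvInv]⟩
      simp [pvStepB]

-- the fold of B over the token stream agrees with the fold of A over the lines
theorem pv_fold_sim :
    ∀ (lines : List (List Char)) (st : List (List (List String)) × List (List String) × Int),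
      pvInv st →
      (lines.map pvTokenB).foldl pvStepB (st.1, st.2.1) =
        ((lines.foldl pvStepA st).1, (lines.foldl pvStepA st).2.1) := by
  intro lines
  induction lines with
  | nil => intro st _; rfl
  | cons l ls ih =>
    intro st hinv
    obtain ⟨h1, hinv2⟩ := pv_step_sim st hinv l
    rw [List.map_cons, List.foldl_cons, List.foldl_cons, h1]
    exact ih (pvStepA st l) hinv2

-- ===== VERDICT (by name: the statement is the Claim_ definition above) =====
theorem extract_tables_from_text_spec : Claim_equal_extract_tables_from_text := by
  intro text _
  unfold Spec_extract_tables_from_text extract_tables_from_text extract_tables_from_text_alt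
  split
  · rfl
  · rw [pv_fold_sim _ ([], [], -1) (by simp [pvInv])]
    simp [pvFinishA, pvFinishB]
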